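-- pv_equiv track=rewrite | github.com/abhiwankenobi/Python-for-text-mining | ASSIGNMENT_4_ABHISHEK_IYER/ted_translation_analysis.py | map_nlang_to_talks
-- ===== SOURCE A (Python) =====
-- def map_nlang_to_talks(talk_id_to_languages):
--     talk_ids, no_langs = [], []
--     for talk_id in talk_id_to_languages:
--         talk_ids.append(talk_id)
--         no_langs.append(len(talk_id_to_languages[talk_id]))
--     nlang_to_talks = {}
--     for no_lang in no_langs:
--         if no_lang not in nlang_to_talks:
--             indexs = [index for index, nn_lang in enumerate(no_langs) if nn_lang==no_lang]
--             nlang_to_talks[no_lang] = [talk_ids[index] for index in indexs]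
--     return nlang_to_talks
-- ===== SOURCE B (Python) =====
-- def map_nlang_to_talks(talk_id_to_languages):
--     # Group talk_ids by language count incrementally, in one pass.
--     nlang_to_talks = {}
--     for talk_id, languages in talk_id_to_languages.items():
--         nlang_to_talks.setdefault(len(languages), []).append(talk_id)
--     return nlang_to_talks
-- ===== Notes on version B (the rewrite author's own statement) =====
-- stated objective: alternative
-- what changed: A rescans the whole language-count list (enumerate + index filter) every time a new count appears; B builds the grouping in a single pass, appending each talk_id to its count's bucket via setdefault, so the inner scans disappear.
import Mathlib
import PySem

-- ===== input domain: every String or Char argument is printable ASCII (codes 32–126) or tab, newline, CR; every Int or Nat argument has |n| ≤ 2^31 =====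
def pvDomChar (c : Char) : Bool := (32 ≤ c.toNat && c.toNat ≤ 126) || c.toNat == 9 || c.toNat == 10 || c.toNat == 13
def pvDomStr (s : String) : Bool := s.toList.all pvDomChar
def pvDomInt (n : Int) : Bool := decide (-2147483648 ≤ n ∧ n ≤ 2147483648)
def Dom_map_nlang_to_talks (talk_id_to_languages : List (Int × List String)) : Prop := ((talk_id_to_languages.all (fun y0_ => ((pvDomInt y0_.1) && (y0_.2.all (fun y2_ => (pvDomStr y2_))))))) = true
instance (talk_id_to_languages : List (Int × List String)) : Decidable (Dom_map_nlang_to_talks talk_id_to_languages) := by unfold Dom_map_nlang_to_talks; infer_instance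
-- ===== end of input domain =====

-- B replaces A's per-new-count rescan (enumerate + index filter) with a single
-- grouping pass that appends each talk_id to its count's bucket (alternative
-- algorithm; not measured as faster).


-- ===== PORT A =====
def map_nlang_to_talks (talk_id_to_languages : List (Int × List String)) : List (Int × List Int) :=
  let st := talk_id_to_languages.foldl
    (fun (acc : List Int × List Int) p =>
      (acc.1 ++ [p.1],
       acc.2 ++ [((PySem.Dict.getD (PySem.Dict.mk talk_id_to_languages) p.1 []).length : Int)]))
    ([], [])
  let talk_ids := st.1
  let no_langs := st.2
  (no_langs.foldl
    (fun (d : PySem.Dict Int (List Int)) no_lang =>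
      if d.contains no_lang then d
      else
        let indexs := ((PySem.List.enumerate no_langs).filter (fun q => q.2 == no_lang)).map (·.1)
        d.insert no_lang (indexs.map (fun i => PySem.List.pyGetD talk_ids i 0)))
    PySem.Dict.empty).items

-- ===== PORT B =====
def map_nlang_to_talks_alt (talk_id_to_languages : List (Int × List String)) : List (Int × List Int) :=
  (talk_id_to_languages.foldl
    (fun (d : PySem.Dict Int (List Int)) p =>
      d.modify ((p.2.length : Int)) [] (fun v => v ++ [p.1]))
    PySem.Dict.empty).items

-- ===== PRECONDITION & SPEC =====
-- Pre_ excludes association lists with duplicate talk_ids: they do not correspond to any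
-- Python dict (the dict collapses duplicates before A ever runs), so A's behaviour there
-- is an artefact of the encoding, not of A.
def Pre_map_nlang_to_talks (talk_id_to_languages : List (Int × List String)) : Prop :=
  (talk_id_to_languages.map Prod.fst).Nodup
instance (talk_id_to_languages : List (Int × List String)) : Decidable (Pre_map_nlang_to_talks talk_id_to_languages) := by unfold Pre_map_nlang_to_talks; infer_instance

def pvWitness_map_nlang_to_talks : (List (Int × List String)) :=
  [(1, ["en", "fr"]), (2, ["de"]), (3, [])]

def Spec_map_nlang_to_talks (talk_id_to_languages : List (Int × List String)) (out : List (Int × List Int)) : Prop := out = map_nlang_to_talks_alt talk_id_to_languages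
instance (talk_id_to_languages : List (Int × List String)) (out : List (Int × List Int)) : Decidable (Spec_map_nlang_to_talks talk_id_to_languages out) := by unfold Spec_map_nlang_to_talks; infer_instance

-- ===== CLAIM (what is proved, stated in full; the proofs are below) =====
def Claim_equal_map_nlang_to_talks : Prop := ∀ (talk_id_to_languages : List (Int × List String)), Dom_map_nlang_to_talks talk_id_to_languages → Pre_map_nlang_to_talks talk_id_to_languages → Spec_map_nlang_to_talks talk_id_to_languages (map_nlang_to_talks talk_id_to_languages)

-- ===== LEMMAS AND PROOFS =====

theorem enumerate_cons {α : Type} (x : α) (t : List α) (s : Int) :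
    PySem.List.enumerate (x :: t) s = (s, x) :: PySem.List.enumerate t (s + 1) := by
  simp [PySem.List.enumerate]
theorem pyGetD_append_cons (pre : List Int) (y : Int) (rest : List Int) :
    PySem.List.pyGetD (pre ++ y :: rest) (pre.length : Int) 0 = y := by
  rw [PySem.List.pyGetD_natCast]; simp [List.getD]
theorem A_group {α : Type} (k f : α → Int) (c : Int) :
    ∀ (as : List α) (pre : List Int),
      ((PySem.List.enumerate (as.map k) (pre.length : Int)).filter (fun q => q.2 == c)).map
          (fun q => PySem.List.pyGetD (pre ++ as.map f) q.1 0)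
        = (as.filter (fun a => k a == c)).map f := by
  intro as
  induction as with
  | nil => intro pre; simp
  | cons a t ih =>
    intro pre
    have hlen : (pre.length : Int) + 1 = ((pre ++ [f a]).length : Int) := by
      simp
    have hpre : pre ++ f a :: List.map f t = (pre ++ [f a]) ++ t.map f := by simp
    simp only [List.map_cons]
    rw [enumerate_cons, List.filter_cons, List.filter_cons]
    by_cases h : k a == c
    · simp only [h, if_pos, List.map_cons]
      congr 1
      · exact pyGetD_append_cons pre (f a) (t.map f)
      · rw [hlen, hpre]; exact ih (pre ++ [f a])
    · simp only [Bool.not_eq_true] at h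
      simp only [h, Bool.false_eq_true, if_false]
      rw [hlen, hpre]; exact ih (pre ++ [f a])

def newKeys (ks : List Int) : List Int → List Int
  | [] => []
  | c :: t => if ks.contains c then newKeys ks t else c :: newKeys (ks ++ [c]) t

theorem update_eq_append_newKeys : ∀ (l ks : List Int),
    PySem.Set.update ks l = ks ++ newKeys ks l := by
  intro l
  induction l with
  | nil => intro ks; simp [PySem.Set.update, newKeys]
  | cons c t ih =>
    intro ks
    by_cases h : ks.contains c
    · simp only [newKeys, h, if_pos]
      have hm : c ∈ ks := by simpa using h
      have : PySem.Set.update ks (c :: t) = PySem.Set.update ks t := by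
        simp [PySem.Set.update, PySem.Set.add, hm]
      rw [this, ih]
    · simp only [Bool.not_eq_true] at h
      simp only [newKeys, h, Bool.false_eq_true, if_false]
      have hm : c ∉ ks := by simpa using h
      have : PySem.Set.update ks (c :: t) = PySem.Set.update (ks ++ [c]) t := by
        simp [PySem.Set.update, PySem.Set.add, hm]
      rw [this, ih, List.append_assoc]; rfl

theorem ofList_eq_newKeys (l : List Int) : PySem.Set.ofList l = newKeys [] l := by
  have := update_eq_append_newKeys l []
  simpa [PySem.Set.ofList, PySem.Set.update] using this

theorem A_fold (g : Int → List Int) :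
    ∀ (l : List Int) (d : PySem.Dict Int (List Int)),
      (l.foldl (fun d c => if d.contains c then d else d.insert c (g c)) d).items
        = d.items ++ (newKeys d.keys l).map (fun c => (c, g c)) := by
  intro l
  induction l with
  | nil => intro d; simp [newKeys]
  | cons c t ih =>
    intro d
    rw [List.foldl_cons]
    by_cases h : d.contains c
    · have hk : d.keys.contains c := by
        have := (PySem.Dict.contains_iff_mem_keys d c).mp h
        simpa using this
      simp only [h, if_pos, newKeys, hk]
      exact ih d
    · simp only [Bool.not_eq_true] at h
      have hk : d.keys.contains c = false := by
        rw [List.contains_eq_mem]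
        simp only [decide_eq_false_iff_not]
        intro hm
        exact absurd ((PySem.Dict.contains_iff_mem_keys d c).mpr hm) (by simp [h])
      simp only [h, Bool.false_eq_true, if_false, newKeys, hk]
      rw [ih (d.insert c (g c)),
          PySem.Dict.items_insert_of_not_contains d (g c) h,
          PySem.Dict.keys_insert_of_not_contains d (g c) h]
      simp

theorem B_fold (pairs : List (Int × Int)) :
    (pairs.foldl (fun (d : PySem.Dict Int (List Int)) q => d.modify q.1 [] (fun v => v ++ [q.2]))
        PySem.Dict.empty).items
      = (PySem.Set.ofList (pairs.map Prod.fst)).map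
          (fun c => (c, (pairs.filter (fun q => q.1 == c)).map Prod.snd)) := by
  have hkeys : (pairs.foldl (fun (d : PySem.Dict Int (List Int)) q => d.modify q.1 [] (fun v => v ++ [q.2])) PySem.Dict.empty).keys
      = PySem.Set.ofList (pairs.map Prod.fst) := by
    rw [PySem.Dict.keys_foldl_modify_key pairs Prod.fst [] (fun _ q v => v ++ [q.2]) PySem.Dict.empty]
    rfl
  have hnd : (pairs.foldl (fun (d : PySem.Dict Int (List Int)) q => d.modify q.1 [] (fun v => v ++ [q.2])) PySem.Dict.empty).keys.Nodup := by
    exact PySem.Dict.nodup_keys_foldl_modify_key pairs Prod.fst [] (fun _ q v => v ++ [q.2]) PySem.Dict.empty (by simp [PySem.Dict.keys_empty])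
  rw [PySem.Dict.items_eq_map_keys _ hnd [], hkeys]
  apply List.map_congr_left
  intro c _
  rw [PySem.Dict.getD_foldl_modify_append]
  simp [PySem.Dict.getD_empty]

theorem first_loop (xs : List (Int × List String)) (hpre : (xs.map Prod.fst).Nodup) :
    (xs.foldl
    (fun (acc : List Int × List Int) p =>
      (acc.1 ++ [p.1],
       acc.2 ++ [((PySem.Dict.getD (PySem.Dict.mk xs) p.1 []).length : Int)]))
    ([], []))
    = (xs.map Prod.fst, xs.map (fun p => ((p.2.length : Int)))) := by
  rw [PySem.List.foldl_prod_mk (f := fun a (p : Int × List String) => a ++ [p.1])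
      (g := fun a (p : Int × List String) => a ++ [((PySem.Dict.getD (PySem.Dict.mk xs) p.1 []).length : Int)])]
  rw [PySem.List.foldl_append_singleton_eq_map, PySem.List.foldl_append_singleton_eq_map]
  simp only [List.nil_append]
  have hnd : (PySem.Dict.mk xs).keys.Nodup := by
    simpa [PySem.Dict.keys] using hpre
  refine Prod.ext rfl ?_
  apply List.map_congr_left
  intro p hp
  have hit : (p.1, p.2) ∈ (PySem.Dict.mk xs).items := by simpa using hp
  have := PySem.Dict.get?_of_mem_items (PySem.Dict.mk xs) hit hnd
  rw [PySem.Dict.getD_eq_get?_getD, this]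
  rfl

-- ===== VERDICT (by name: the statement is the Claim_ definition above) =====
theorem map_nlang_to_talks_spec : Claim_equal_map_nlang_to_talks := by
  intro xs _hdom hpre
  unfold Spec_map_nlang_to_talks
  have hA : map_nlang_to_talks xs
      = ((xs.map (fun p => ((p.2.length : Int)))).foldl
          (fun (d : PySem.Dict Int (List Int)) c =>
            if d.contains c then d
            else d.insert c
              ((((PySem.List.enumerate (xs.map (fun p => ((p.2.length : Int))))).filter
                  (fun q => q.2 == c)).map (fun q => q.1)).map
                (fun i => PySem.List.pyGetD (xs.map Prod.fst) i 0)))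
          PySem.Dict.empty).items := by
    simp only [map_nlang_to_talks]
    rw [first_loop xs hpre]
  rw [hA, A_fold]
  have hB : map_nlang_to_talks_alt xs
      = (PySem.Set.ofList ((xs.map (fun p => ((p.2.length : Int), p.1))).map Prod.fst)).map
          (fun c => (c, ((xs.map (fun p => ((p.2.length : Int), p.1))).filter
              (fun q => q.1 == c)).map Prod.snd)) := by
    unfold map_nlang_to_talks_alt
    rw [← B_fold, List.foldl_map]
  rw [hB]
  simp only [List.map_map]
  rw [ofList_eq_newKeys]
  have he : (PySem.Dict.empty : PySem.Dict Int (List Int)).items = [] := rfl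
  have hk : (PySem.Dict.empty : PySem.Dict Int (List Int)).keys = [] := rfl
  rw [he, hk, List.nil_append]
  have harg : (List.map (Prod.fst ∘ fun (p : Int × List String) => ((p.2.length : Int), p.1)) xs)
      = List.map (fun (p : Int × List String) => ((p.2.length : Int))) xs := by
    simp [Function.comp]
  rw [harg]
  apply List.map_congr_left
  intro c hc
  simp only [Prod.mk.injEq]
  refine ⟨trivial, ?_⟩
  rw [List.filter_map, List.map_map]
  have hAg := A_group (fun (p : Int × List String) => ((p.2.length : Int))) Prod.fst c xs []
  simp only [List.length_nil, Nat.cast_zero, List.nil_append] at hAg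
  exact hAg
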